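-- pv_equiv track=rewrite | github.com/logic-math/cut | cut/skills/fetch-assets/scripts/fetch_music.py | _parse_music_keywords
-- ===== SOURCE A (Python) =====
-- def _parse_music_keywords(keywords):
--     """Parse music keywords into mood, genre, and plain query terms.
--
--     Supports prefixed keywords like 'mood:calm', 'genre:ambient'.
--
--     Returns:
--         (mood, genre, plain_terms) tuple of strings/lists
--     """
--     mood = ''
--     genre = ''
--     plain = []
--     for kw in (keywords if isinstance(keywords, list) else [keywords]):
--         if kw.startswith('mood:'):
--             mood = kw[5:]
--         elif kw.startswith('genre:'):
--             genre = kw[6:]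
--         else:
--             plain.append(kw)
--     return mood, genre, plain
-- ===== SOURCE B (Python) =====
-- def _parse_music_keywords(keywords):
--     """Parse music keywords into mood, genre, and plain query terms.
--
--     Three separate filtering passes instead of one branching loop;
--     last-wins for mood/genre via the final element of each filtered list.
--     """
--     kws = keywords if isinstance(keywords, list) else [keywords]
--     moods = [kw[5:] for kw in kws if kw.startswith('mood:')]
--     genres = [kw[6:] for kw in kws if kw.startswith('genre:')]
--     plain = [kw for kw in kws
--              if not kw.startswith('mood:') and not kw.startswith('genre:')]
--     return (moods[-1] if moods else '',
--             genres[-1] if genres else '',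
--             plain)
-- ===== Notes on version B (the rewrite author's own statement) =====
-- stated objective: alternative
-- what changed: Replaces the single branching loop with three independent filtering passes (mood-stripped values, genre-stripped values, plain terms), taking the last element of each prefixed list for last-wins semantics.
import Mathlib
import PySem

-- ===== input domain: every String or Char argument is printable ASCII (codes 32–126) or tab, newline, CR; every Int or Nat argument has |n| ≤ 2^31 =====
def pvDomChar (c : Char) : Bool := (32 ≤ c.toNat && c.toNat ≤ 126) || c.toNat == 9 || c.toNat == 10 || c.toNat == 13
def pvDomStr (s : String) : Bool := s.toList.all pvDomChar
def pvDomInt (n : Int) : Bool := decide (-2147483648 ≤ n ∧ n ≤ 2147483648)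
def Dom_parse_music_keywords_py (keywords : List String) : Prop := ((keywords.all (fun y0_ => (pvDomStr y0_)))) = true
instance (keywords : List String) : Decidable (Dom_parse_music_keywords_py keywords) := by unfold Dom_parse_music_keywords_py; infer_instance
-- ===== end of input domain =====

-- B replaces A's single branching loop with three independent filtering passes
-- (mood values, genre values, plain terms); same O(n) cost, alternative decomposition.


-- ===== PORT A =====
-- single pass: fold over the keywords, updating (mood, genre, plain) per branch
def parse_music_keywords_py (keywords : List String) : String × String × List String :=
  keywords.foldl
    (fun (acc : String × String × List String) kw =>
      if PySem.Str.startswith kw "mood:" then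
        (PySem.Str.slice kw (some 5) none, acc.2.1, acc.2.2)
      else if PySem.Str.startswith kw "genre:" then
        (acc.1, PySem.Str.slice kw (some 6) none, acc.2.2)
      else
        (acc.1, acc.2.1, acc.2.2 ++ [kw]))
    ("", "", [])

-- ===== PORT B =====
-- three filtering passes; last element of each prefixed list, filtered plain terms
def parse_music_keywords_py_alt (keywords : List String) : String × String × List String :=
  let moods := (keywords.filter (fun kw => PySem.Str.startswith kw "mood:")).map
      (fun kw => PySem.Str.slice kw (some 5) none)
  let genres := (keywords.filter (fun kw => PySem.Str.startswith kw "genre:")).map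
      (fun kw => PySem.Str.slice kw (some 6) none)
  let plain := keywords.filter
      (fun kw => !PySem.Str.startswith kw "mood:" && !PySem.Str.startswith kw "genre:")
  (moods.getLastD "", genres.getLastD "", plain)

-- ===== PRECONDITION & SPEC =====
def Spec_parse_music_keywords_py (keywords : List String) (out : String × String × List String) : Prop := out = parse_music_keywords_py_alt keywords
instance (keywords : List String) (out : String × String × List String) : Decidable (Spec_parse_music_keywords_py keywords out) := by unfold Spec_parse_music_keywords_py; infer_instance

-- ===== CLAIM (what is proved, stated in full; the proofs are below) =====
def Claim_equal_parse_music_keywords_py : Prop := ∀ (keywords : List String), Dom_parse_music_keywords_py keywords → Spec_parse_music_keywords_py keywords (parse_music_keywords_py keywords)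

-- ===== LEMMAS AND PROOFS =====

-- a string starting with "mood:" cannot start with "genre:"
lemma not_genre_of_mood (kw : String)
    (h : PySem.Str.startswith kw "mood:" = true) :
    PySem.Str.startswith kw "genre:" = false := by
  by_contra hg
  rw [Bool.not_eq_false] at hg
  simp only [PySem.Str.startswith_eq] at h hg
  rw [PySem.Chars.startswith_iff] at h hg
  obtain ⟨t1, e1⟩ := h
  obtain ⟨t2, e2⟩ := hg
  rw [← e1] at e2
  simp at e2

-- generalized loop invariant for A's fold
lemma loop_eq (keywords : List String) (m g : String) (p : List String) :
    keywords.foldl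
      (fun (acc : String × String × List String) kw =>
        if PySem.Str.startswith kw "mood:" then
          (PySem.Str.slice kw (some 5) none, acc.2.1, acc.2.2)
        else if PySem.Str.startswith kw "genre:" then
          (acc.1, PySem.Str.slice kw (some 6) none, acc.2.2)
        else
          (acc.1, acc.2.1, acc.2.2 ++ [kw]))
      (m, g, p)
    = (((keywords.filter (fun kw => PySem.Str.startswith kw "mood:")).map
          (fun kw => PySem.Str.slice kw (some 5) none)).getLastD m,
       ((keywords.filter (fun kw => PySem.Str.startswith kw "genre:")).map
          (fun kw => PySem.Str.slice kw (some 6) none)).getLastD g,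
       p ++ keywords.filter
         (fun kw => !PySem.Str.startswith kw "mood:" && !PySem.Str.startswith kw "genre:")) := by
  induction keywords generalizing m g p with
  | nil => simp
  | cons kw rest ih =>
    simp only [PySem.Str.startswith_eq] at ih
    by_cases hm : PySem.Str.startswith kw "mood:" = true
    · have hg := not_genre_of_mood kw hm
      simp only [PySem.Str.startswith_eq] at hm hg
      simp only [List.foldl_cons, List.filter_cons, hm, hg, PySem.Str.startswith_eq,
        if_true, Bool.false_eq_true, if_false, Bool.not_true, Bool.not_false,
        Bool.false_and, ih, List.map_cons, List.getLastD_cons]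
    · by_cases hg : PySem.Str.startswith kw "genre:" = true
      · simp only [PySem.Str.startswith_eq] at hm hg
        simp only [List.foldl_cons, List.filter_cons, hm, hg, PySem.Str.startswith_eq,
          if_true, Bool.false_eq_true, if_false, Bool.not_true, Bool.not_false,
          Bool.and_false, ih, List.map_cons, List.getLastD_cons]
      · simp only [PySem.Str.startswith_eq] at hm hg
        simp only [List.foldl_cons, List.filter_cons, hm, hg, PySem.Str.startswith_eq,
          if_true, Bool.false_eq_true, if_false, Bool.not_false,
          Bool.and_self, ih, List.append_assoc, List.singleton_append]

-- ===== VERDICT (by name: the statement is the Claim_ definition above) =====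
theorem parse_music_keywords_py_spec : Claim_equal_parse_music_keywords_py := by
  intro keywords _
  unfold Spec_parse_music_keywords_py parse_music_keywords_py parse_music_keywords_py_alt
  rw [loop_eq]
  simp
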